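-- pv_equiv track=rewrite | github.com/mickjohn/websocket_games | websocketgames/games/high_or_low/handler.py | _group_counter
-- ===== SOURCE A (Python) =====
-- def _group_counter(counter, reverse=False):
--     '''
--     Given a counter return a dict of place -> [(uname, count)], e.g.
--     { '1': ([mick, john], 20),
--     // 2nd place skipped, because of tie in first place
--     '3': ([stan], 5) }
--     '''
--
--     if reverse:
--         sorted_counter = sorted(list(counter.items()), key=lambda v: v[1])
--     else:
--         sorted_counter = sorted(list(counter.items()), key=lambda v: -v[1])
--
--     places_and_scores = {}
--     place = 0
--     index = 0
--     last_val = None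
--     for (uname, count) in sorted_counter:
--         if last_val != count:
--             place += 1
--             index = place
--         else:
--             place += 1
--         if index not in places_and_scores:
--             places_and_scores[index] = ([], count)
--         places_and_scores[index][0].append(uname)
--         last_val = count
--
--     return places_and_scores
-- ===== SOURCE B (Python) =====
-- def _group_counter(counter, reverse=False):
--     # Group each distinct count to its unames (insertion order keeps tie order),
--     # then walk the counts in rank order keeping a running 'placed' total.
--     groups = {}
--     for uname, count in counter.items():
--         groups.setdefault(count, []).append(uname)
--     places_and_scores = {}
--     placed = 0
--     for count in sorted(groups, reverse=not reverse):
--         unames = groups[count]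
--         places_and_scores[placed + 1] = (unames, count)
--         placed += len(unames)
--     return places_and_scores
-- ===== Notes on version B (the rewrite author's own statement) =====
-- stated objective: alternative
-- what changed: Instead of sorting all n (uname,count) pairs and running a 4-variable state machine (place/index/last_val) with per-item dict membership tests, B groups unames by count in one dict pass, sorts only the distinct counts, and emits each group at rank placed+1 while accumulating a running placed total.
import Mathlib
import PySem

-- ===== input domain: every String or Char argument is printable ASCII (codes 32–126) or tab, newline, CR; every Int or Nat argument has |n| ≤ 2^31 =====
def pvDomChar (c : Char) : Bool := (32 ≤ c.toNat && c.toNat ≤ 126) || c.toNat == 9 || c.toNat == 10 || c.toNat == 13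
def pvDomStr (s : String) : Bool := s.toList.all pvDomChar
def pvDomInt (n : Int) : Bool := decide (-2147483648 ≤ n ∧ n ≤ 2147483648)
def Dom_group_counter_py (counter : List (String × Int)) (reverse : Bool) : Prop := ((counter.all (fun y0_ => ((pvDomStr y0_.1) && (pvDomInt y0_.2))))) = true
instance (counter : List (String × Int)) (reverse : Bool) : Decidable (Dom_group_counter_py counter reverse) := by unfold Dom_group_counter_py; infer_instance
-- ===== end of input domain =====

-- B re-implements the ranking by grouping unames per distinct count and walking the sorted
-- distinct counts with a running 'placed' total, instead of A's sort-all-pairs state machine.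

-- ===== PORT A =====
-- loop body of A's 'for (uname, count) in sorted_counter', state = (places_and_scores, place, index, last_val)
def groupStepA (st : PySem.Dict Int (List String × Int) × Int × Int × Option Int)
    (uc : String × Int) : PySem.Dict Int (List String × Int) × Int × Int × Option Int :=
  let place := st.2.1 + 1
  let index := if st.2.2.2 ≠ some uc.2 then place else st.2.2.1
  let d := if st.1.contains index then st.1 else st.1.insert index ([], uc.2)
  (d.modify index ([], 0) (fun q => (q.1 ++ [uc.1], q.2)), place, index, some uc.2)

def group_counter_py (counter : List (String × Int)) (reverse : Bool) : List (Int × List String × Int) :=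
  let sorted_counter :=
    if reverse then PySem.List.sorted counter (fun v => v.2)
    else PySem.List.sorted counter (fun v => -v.2)
  (sorted_counter.foldl groupStepA (PySem.Dict.empty, 0, 0, none)).1.items

-- ===== PORT B =====
def group_counter_py_alt (counter : List (String × Int)) (reverse : Bool) : List (Int × List String × Int) :=
  let groups : PySem.Dict Int (List String) :=
    counter.foldl (fun d p => d.modify p.2 [] (fun l => l ++ [p.1])) PySem.Dict.empty
  ((PySem.List.sorted groups.keys (fun c => c) (!reverse)).foldl
    (fun (st : List (Int × List String × Int) × Int) c =>
      (st.1 ++ [(st.2 + 1, groups.getD c [], c)], st.2 + ((groups.getD c []).length : Int)))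
    ([], 0)).1

-- ===== PRECONDITION & SPEC =====
def Spec_group_counter_py (counter : List (String × Int)) (reverse : Bool) (out : List (Int × List String × Int)) : Prop := out = group_counter_py_alt counter reverse
instance (counter : List (String × Int)) (reverse : Bool) (out : List (Int × List String × Int)) : Decidable (Spec_group_counter_py counter reverse out) := by unfold Spec_group_counter_py; infer_instance

-- ===== CLAIM (what is proved, stated in full; the proofs are below) =====
def Claim_equal_group_counter_py : Prop := ∀ (counter : List (String × Int)) (reverse : Bool), Dom_group_counter_py counter reverse → Spec_group_counter_py counter reverse (group_counter_py counter reverse)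

-- ===== LEMMAS AND PROOFS =====

-- the ranked output both sides build: one entry (placed+1, group, count) per distinct count
def buildB : List Int → (Int → List String) → Int → List (Int × List String × Int)
  | [], _, _ => []
  | c :: K, G, p => (p + 1, G c, c) :: buildB K G (p + ((G c).length : Int))

theorem flatMap_map {α β γ : Type} (K : List α) (g : α → β) (f : β → List γ) :
    (K.map g).flatMap f = K.flatMap (fun c => f (g c)) := by
  induction K with
  | nil => rfl
  | cons c K ih => simp only [List.map_cons, List.flatMap_cons, ih]

theorem map_fst_pair_eq_self (c : Int) :
    ∀ l : List (String × Int), (∀ p ∈ l, p.2 = c) → l.map (fun p => (p.1, c)) = l := by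
  intro l
  induction l with
  | nil => intro _; rfl
  | cons p l ih =>
    intro h
    have hp : p.2 = c := h p (by simp)
    simp only [List.map_cons, List.cons.injEq]
    exact ⟨by rw [← hp], ih (fun q hq => h q (by simp [hq]))⟩

theorem block_eq_map (counter : List (String × Int)) (c : Int) :
    counter.filter (fun p => p.2 == c)
      = ((counter.filter (fun p => p.2 == c)).map (fun p => p.1)).map (fun u => (u, c)) := by
  rw [List.map_map]
  exact (map_fst_pair_eq_self c _ (fun p hp => by simpa using List.of_mem_filter hp)).symm


theorem flatMap_congr_mem {α β : Type} (K : List α) (f g : α → List β)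
    (h : ∀ c ∈ K, f c = g c) : K.flatMap f = K.flatMap g := by
  induction K with
  | nil => rfl
  | cons c K ih =>
    simp only [List.flatMap_cons, h c (by simp), ih (fun c hc => h c (by simp [hc]))]

theorem insertBy_append_of_not_before {α : Type} (before : α → α → Bool) (x : α)
    (P Q : List α) (h : ∀ p ∈ P, before x p = false) :
    PySem.List.insertBy before x (P ++ Q) = P ++ PySem.List.insertBy before x Q := by
  induction P with
  | nil => rfl
  | cons p P ih =>
    simp only [List.cons_append, PySem.List.insertBy, h p (by simp)]
    simp only [Bool.false_eq_true, if_false, List.cons.injEq, true_and]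
    exact ih (fun q hq => h q (by simp [hq]))

theorem insertBy_eq_cons_of_all_before {α : Type} (before : α → α → Bool) (x : α)
    (L : List α) (h : ∀ p ∈ L, before x p = true) :
    PySem.List.insertBy before x L = x :: L := by
  cases L with
  | nil => rfl
  | cons p L => simp [PySem.List.insertBy, h p (by simp)]

theorem dropWhile_lt_ge (c : Int) :
    ∀ K : List Int, K.Pairwise (· < ·) →
      ∀ b ∈ K.dropWhile (fun k => decide (k < c)), c ≤ b := by
  intro K
  induction K with
  | nil => intro _ b hb; simp at hb
  | cons k K ih =>
    intro hp b hb
    by_cases hk : k < c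
    · rw [List.dropWhile_cons_of_pos (by simpa using hk)] at hb
      exact ih hp.of_cons b hb
    · rw [List.dropWhile_cons_of_neg (by simpa using hk)] at hb
      rcases List.mem_cons.1 hb with rfl | hb
      · omega
      · have := (List.pairwise_cons.1 hp).1 b hb; omega

theorem ins_mem (key : (String × Int) → Int) (x : String × Int)
    (B : Int → List (String × Int)) (hB : ∀ c' p, p ∈ B c' → key p = c') :
    ∀ K : List Int, K.Pairwise (· < ·) → key x ∈ K →
      PySem.List.insertBy (fun a b => decide (key a < key b)) x (K.flatMap B)
        = K.flatMap (fun c' => B c' ++ if key x == c' then [x] else []) := by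
  intro K
  induction K with
  | nil => intro _ h; simp at h
  | cons k K ih =>
    intro hp hmem
    rw [List.flatMap_cons, List.flatMap_cons]
    by_cases hk : key x = k
    · rw [insertBy_append_of_not_before _ _ _ _
        (fun p hp' => by have := hB k p hp'; simp [this, hk])]
      rw [insertBy_eq_cons_of_all_before _ _ _
        (fun p hp' => by
          rcases List.mem_flatMap.1 hp' with ⟨c', hc', hpc⟩
          have hkc : k < c' := (List.pairwise_cons.1 hp).1 c' hc'
          have := hB c' p hpc
          simp only [decide_eq_true_eq]; omega)]
      have h2 : K.flatMap (fun c' => B c' ++ if key x == c' then [x] else [])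
          = K.flatMap B := flatMap_congr_mem K _ B (fun c' hc' => by
        have hkc : k < c' := (List.pairwise_cons.1 hp).1 c' hc'
        rw [if_neg (by simp only [beq_iff_eq]; omega), List.append_nil])
      rw [h2, if_pos (by simpa using hk)]
      simp
    · have hmem' : key x ∈ K := by
        rcases List.mem_cons.1 hmem with h | h
        · exact absurd h hk
        · exact h
      have hkx : k < key x := (List.pairwise_cons.1 hp).1 _ hmem'
      rw [insertBy_append_of_not_before _ _ _ _
        (fun p hp' => by have := hB k p hp'; simp only [decide_eq_false_iff_not]; omega)]
      rw [ih hp.of_cons hmem', if_neg (by simp only [beq_iff_eq]; omega), List.append_nil]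

theorem ins_new (key : (String × Int) → Int) (x : String × Int)
    (B : Int → List (String × Int)) (hB : ∀ c' p, p ∈ B c' → key p = c') :
    ∀ K : List Int, K.Pairwise (· < ·) → key x ∉ K →
      PySem.List.insertBy (fun a b => decide (key a < key b)) x (K.flatMap B)
        = (K.takeWhile (fun k => decide (k < key x))).flatMap B
          ++ x :: (K.dropWhile (fun k => decide (k < key x))).flatMap B := by
  intro K
  induction K with
  | nil => intro _ _; rfl
  | cons k K ih =>
    intro hp hmem
    by_cases hk : k < key x
    · rw [List.takeWhile_cons_of_pos (by simpa using hk),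
        List.dropWhile_cons_of_pos (by simpa using hk),
        List.flatMap_cons, List.flatMap_cons]
      rw [insertBy_append_of_not_before _ _ _ _
        (fun p hp' => by have := hB k p hp'; simp only [decide_eq_false_iff_not]; omega)]
      rw [ih hp.of_cons (fun h => hmem (List.mem_cons_of_mem _ h)), List.append_assoc]
    · rw [List.takeWhile_cons_of_neg (by simpa using hk),
        List.dropWhile_cons_of_neg (by simpa using hk)]
      rw [insertBy_eq_cons_of_all_before _ _ _
        (fun p hp' => by
          rcases List.mem_flatMap.1 hp' with ⟨c', hc', hpc⟩
          have := hB c' p hpc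
          have hge : key x ≤ c' := by
            rcases List.mem_cons.1 hc' with rfl | h
            · omega
            · have := (List.pairwise_cons.1 hp).1 c' h; omega
          have hne : key x ≠ c' := fun hEq => hmem (hEq ▸ hc')
          simp only [decide_eq_true_eq]; omega)]
      rfl

theorem stable_sort_flatMap (key : (String × Int) → Int) :
    ∀ xs : List (String × Int),
      PySem.List.sorted xs key =
        (PySem.List.sorted (PySem.Set.ofList (xs.map key)) (fun c => c)).flatMap
          (fun c => xs.filter (fun p => key p == c)) := by
  intro xs
  induction xs using List.reverseRecOn with
  | nil => rfl
  | append_singleton xs x ih =>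
    have hsortK := PySem.List.sorted_ofList_pairwise_lt (xs.map key)
    have hLHS : PySem.List.sorted (xs ++ [x]) key
        = PySem.List.insertBy (fun a b => decide (key a < key b)) x
            (PySem.List.sorted xs key) := by
      rw [PySem.List.sorted_eq_foldl_insertBy, PySem.List.sorted_eq_foldl_insertBy,
        List.foldl_append, List.foldl_cons, List.foldl_nil]
    set K := PySem.List.sorted (PySem.Set.ofList (xs.map key)) (fun c : Int => c) with hK
    have hblocks : ∀ c : Int, (xs ++ [x]).filter (fun p => key p == c)
        = xs.filter (fun p => key p == c) ++ (if key x == c then [x] else []) := by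
      intro c
      rw [List.filter_append, List.filter_singleton]
      cases hb : (key x == c) <;> simp
    by_cases hmem : key x ∈ xs.map key
    · have hKeq : PySem.Set.ofList ((xs ++ [x]).map key) = PySem.Set.ofList (xs.map key) := by
        rw [List.map_append, List.map_singleton, PySem.Set.ofList_append_singleton,
          PySem.Set.add_of_mem ((PySem.Set.mem_ofList _ _).2 hmem)]
      rw [hLHS, ih, hKeq]
      rw [ins_mem key x _ (fun c' p hp => by
          have := List.of_mem_filter hp; simpa using this)
        K hsortK (by
          rw [hK, PySem.List.mem_sorted, PySem.Set.mem_ofList]; exact hmem)]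
      exact flatMap_congr_mem K _ _ (fun c _ => (hblocks c).symm)
    · have hKeq : PySem.Set.ofList ((xs ++ [x]).map key)
          = PySem.Set.ofList (xs.map key) ++ [key x] := by
        rw [List.map_append, List.map_singleton, PySem.Set.ofList_append_singleton,
          PySem.Set.add_of_not_mem (fun h => hmem ((PySem.Set.mem_ofList _ _).1 h))]
      have hxK : key x ∉ K := by
        rw [hK, PySem.List.mem_sorted, PySem.Set.mem_ofList]; exact hmem
      set tW := K.takeWhile (fun k => decide (k < key x)) with htW
      set dW := K.dropWhile (fun k => decide (k < key x)) with hdW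
      have htWdW : tW ++ dW = K := List.takeWhile_append_dropWhile
      have hKnew : PySem.List.sorted (PySem.Set.ofList ((xs ++ [x]).map key)) (fun c : Int => c)
          = tW ++ key x :: dW := by
        rw [hKeq]
        apply PySem.List.sorted_eq_of_perm_of_pairwise_lt
        · have p1 : (tW ++ key x :: dW).Perm (key x :: (tW ++ dW)) := List.perm_middle
          rw [htWdW] at p1
          have p2 : (key x :: K).Perm (key x :: PySem.Set.ofList (xs.map key)) :=
            (PySem.List.sorted_perm _ _ _).cons _
          have p3 : (PySem.Set.ofList (xs.map key) ++ [key x]).Perm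
              (key x :: PySem.Set.ofList (xs.map key)) := List.perm_append_singleton _ _
          exact (p1.trans p2).trans p3.symm
        · have hpairK := hsortK
          have htWsub : tW.Pairwise (fun a b : Int => a < b) :=
            hpairK.sublist (htW ▸ List.takeWhile_sublist _)
          have hdWsub : dW.Pairwise (fun a b : Int => a < b) :=
            hpairK.sublist (hdW ▸ List.dropWhile_sublist _)
          have hdWge : ∀ b ∈ dW, key x ≤ b := by
            intro b hb; exact dropWhile_lt_ge (key x) K hpairK b (hdW ▸ hb)
          have hdWgt : ∀ b ∈ dW, key x < b := by
            intro b hb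
            have hne : key x ≠ b := fun hEq =>
              hxK (hEq ▸ (htWdW ▸ List.mem_append_right tW hb))
            have := hdWge b hb; omega
          rw [List.pairwise_append]
          refine ⟨htWsub, List.pairwise_cons.2 ⟨hdWgt, hdWsub⟩, ?_⟩
          intro a ha b hb
          have halt : a < key x := by
            have := List.mem_takeWhile_imp (htW ▸ ha); simpa using this
          rcases List.mem_cons.1 hb with rfl | hb
          · exact halt
          · have := hdWgt b hb; omega
      rw [hLHS, ih, hKnew]
      rw [ins_new key x _ (fun c' p hp => by
          have := List.of_mem_filter hp; simpa using this) K hsortK hxK]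
      rw [List.flatMap_append, List.flatMap_cons]
      have hBc : (xs ++ [x]).filter (fun p => key p == key x) = [x] := by
        rw [hblocks]
        rw [List.filter_eq_nil_iff.2 (fun p hp => by
          simp only [beq_iff_eq]
          intro hEq; exact hmem (List.mem_map.2 ⟨p, hp, hEq⟩))]
        simp
      have hKsub : ∀ c' ∈ K, (xs ++ [x]).filter (fun p => key p == c')
          = xs.filter (fun p => key p == c') := by
        intro c' hc'
        rw [hblocks, if_neg (by
          simp only [beq_iff_eq]
          intro hEq; exact hxK (hEq ▸ hc')), List.append_nil]
      rw [hBc]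
      rw [flatMap_congr_mem tW _ _ (fun c hc =>
        (hKsub c (htWdW ▸ List.mem_append_left dW hc)).symm)]
      rw [flatMap_congr_mem dW _ _ (fun c hc =>
        (hKsub c (htWdW ▸ List.mem_append_right tW hc)).symm)]
      simp


theorem sorted_ofList_pairwise_gt (m : List Int) :
    (PySem.List.sorted (PySem.Set.ofList m) (fun c => c) true).Pairwise (fun a b => b < a) := by
  have h1 := PySem.List.sorted_pairwise_rev (PySem.Set.ofList m) (fun c : Int => c)
  have h2 : (PySem.List.sorted (PySem.Set.ofList m) (fun c : Int => c) true).Nodup :=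
    (PySem.List.sorted_perm (PySem.Set.ofList m) (fun c : Int => c) true).symm.nodup
      (PySem.Set.nodup_ofList m)
  exact (h1.and h2).imp (fun h => by have := h.1; have := h.2; omega)

theorem ofList_map_neg :
    ∀ m : List Int, PySem.Set.ofList (m.map (fun c => -c))
      = (PySem.Set.ofList m).map (fun c => -c) := by
  intro m
  induction m using List.reverseRecOn with
  | nil => rfl
  | append_singleton m a ih =>
    rw [List.map_append, List.map_singleton, PySem.Set.ofList_append_singleton,
      PySem.Set.ofList_append_singleton, ih]
    by_cases h : a ∈ PySem.Set.ofList m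
    · rw [PySem.Set.add_of_mem h, PySem.Set.add_of_mem
        (List.mem_map.2 ⟨a, h, rfl⟩)]
    · rw [PySem.Set.add_of_not_mem h, PySem.Set.add_of_not_mem (by
        simp only [List.mem_map]; rintro ⟨b, hb, hba⟩
        have : b = a := by omega
        exact h (this ▸ hb)), List.map_append]
      rfl

theorem sorted_map_neg (m : List Int) :
    PySem.List.sorted ((PySem.Set.ofList m).map (fun c => -c)) (fun c => c)
      = (PySem.List.sorted (PySem.Set.ofList m) (fun c => c) true).map (fun c => -c) := by
  apply PySem.List.sorted_eq_of_perm_of_pairwise_lt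
  · exact ((PySem.List.sorted_perm (PySem.Set.ofList m) (fun c : Int => c) true).map _)
  · have := (sorted_ofList_pairwise_gt m).map (fun c : Int => -c)
      (S := fun a b => a < b) (fun a b h => by simpa using h)
    exact this


theorem getD_groups :
    ∀ (counter : List (String × Int)) (d : PySem.Dict Int (List String)) (c : Int),
      (counter.foldl (fun d p => d.modify p.2 [] (fun l => l ++ [p.1])) d).getD c []
        = d.getD c [] ++ (counter.filter (fun p => p.2 == c)).map (fun p => p.1) := by
  intro counter
  induction counter with
  | nil => intro d c; simp
  | cons q counter ih =>
    intro d c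
    rw [List.foldl_cons, ih]
    by_cases h : q.2 = c
    · rw [List.filter_cons_of_pos (by simpa using h)]
      rw [PySem.Dict.getD_modify]
      simp [h]
    · rw [List.filter_cons_of_neg (by simpa using h)]
      rw [PySem.Dict.getD_modify]
      have hcq : ¬ (c = q.2) := fun hh => h hh.symm
      simp [hcq]

theorem keys_groups (counter : List (String × Int)) :
    (counter.foldl (fun d p => d.modify p.2 [] (fun l => l ++ [p.1]))
        (PySem.Dict.empty : PySem.Dict Int (List String))).keys
      = PySem.Set.ofList (counter.map (fun p => p.2)) := by
  have h := PySem.Dict.keys_foldl_modify_key counter (fun p : String × Int => p.2) []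
    (fun _ p l => l ++ [p.1]) (PySem.Dict.empty : PySem.Dict Int (List String))
  simpa [PySem.Set.update_nil_left] using h

theorem foldB_run (g : PySem.Dict Int (List String)) :
    ∀ (K : List Int) (acc : List (Int × List String × Int)) (p : Int),
      (K.foldl (fun (st : List (Int × List String × Int) × Int) c =>
          (st.1 ++ [(st.2 + 1, g.getD c [], c)], st.2 + ((g.getD c []).length : Int)))
        (acc, p)).1
      = acc ++ buildB K (fun c => g.getD c []) p := by
  intro K
  induction K with
  | nil => intro acc p; simp [buildB]
  | cons c K ih =>
    intro acc p
    rw [List.foldl_cons]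
    simp only []
    rw [ih]
    simp [buildB]

theorem runA_tail (us : List String) (c : Int) :
    ∀ (d0 : PySem.Dict Int (List String × Int)) (i : Int) (vs : List String) (p : Int),
    (us.map (fun u => (u, c))).foldl groupStepA (d0.insert i (vs, c), p, i, some c)
      = (d0.insert i (vs ++ us, c), p + (us.length : Int), i, some c) := by
  induction us with
  | nil => intro d0 i vs p; simp
  | cons u us ih =>
    intro d0 i vs p
    rw [List.map_cons, List.foldl_cons]
    have hstep : groupStepA (d0.insert i (vs, c), p, i, some c) (u, c)
        = (d0.insert i (vs ++ [u], c), p + 1, i, some c) := by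
      simp only [groupStepA, PySem.Dict.modify]
      simp [PySem.Dict.contains_insert_self, PySem.Dict.getD_insert_self,
        PySem.Dict.insert_insert_self]
    rw [hstep, ih]
    simp only [List.append_assoc, List.singleton_append, List.length_cons]
    have harith : p + 1 + (us.length : Int) = p + ((us.length + 1 : Nat) : Int) := by
      push_cast; ring
    rw [harith]

theorem runA_block (us : List String) (c : Int) (d : PySem.Dict Int (List String × Int))
    (p pi : Int) (l : Option Int) (hus : us ≠ []) (hl : l ≠ some c)
    (hc : d.contains (p + 1) = false) :
    (us.map (fun u => (u, c))).foldl groupStepA (d, p, pi, l)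
      = (d.insert (p + 1) (us, c), p + (us.length : Int), p + 1, some c) := by
  cases us with
  | nil => exact absurd rfl hus
  | cons u us =>
    rw [List.map_cons, List.foldl_cons]
    have hstep : groupStepA (d, p, pi, l) (u, c)
        = (d.insert (p + 1) ([u], c), p + 1, p + 1, some c) := by
      simp only [groupStepA, PySem.Dict.modify]
      simp [hl, hc, PySem.Dict.getD_insert_self, PySem.Dict.insert_insert_self]
    rw [hstep, runA_tail]
    simp only [List.singleton_append, List.length_cons]
    have harith : p + 1 + (us.length : Int) = p + ((us.length + 1 : Nat) : Int) := by
      push_cast; ring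
    rw [harith]

theorem runA_keys :
    ∀ (K : List Int) (G : Int → List String) (d : PySem.Dict Int (List String × Int))
      (p pi : Int) (l : Option Int), K.Nodup → (∀ c ∈ K, G c ≠ []) →
      (∀ c ∈ K, l ≠ some c) → (∀ r ∈ d.keys, r ≤ p) →
      ((K.flatMap (fun c => (G c).map (fun u => (u, c)))).foldl groupStepA (d, p, pi, l)).1.items
        = d.items ++ buildB K G p := by
  intro K
  induction K with
  | nil => intro G d p pi l _ _ _ _; simp [buildB]
  | cons c K ih =>
    intro G d p pi l hnd hG hl hkeys
    have hc : d.contains (p + 1) = false := by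
      rw [PySem.Dict.contains_eq_decide_mem_keys]
      simp only [decide_eq_false_iff_not]
      intro hmem
      have := hkeys _ hmem; omega
    rw [List.flatMap_cons, List.foldl_append,
      runA_block (G c) c d p pi l (hG c (by simp)) (hl c (by simp)) hc]
    have hlen : (1 : Int) ≤ ((G c).length : Int) := by
      have : (G c).length ≠ 0 := fun h => (hG c (by simp)) (List.length_eq_zero_iff.1 h)
      omega
    rw [ih G _ _ _ _ hnd.of_cons (fun c' h => hG c' (by simp [h]))
      (by
        intro c' hc' heq
        have : c = c' := by injection heq
        exact (List.nodup_cons.1 hnd).1 (this ▸ hc'))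
      (by
        intro r hr
        rw [PySem.Dict.keys_insert_of_not_contains _ _ hc] at hr
        rcases List.mem_append.1 hr with h | h
        · have := hkeys r h; omega
        · simp at h; omega)]
    rw [PySem.Dict.items_insert_of_not_contains _ _ hc]
    simp [buildB]


theorem main_equiv (counter : List (String × Int)) (key : (String × Int) → Int)
    (K : List Int)
    (hKs : PySem.List.sorted counter key
      = K.flatMap (fun c => counter.filter (fun p => p.2 == c)))
    (hKperm : K.Perm (PySem.Set.ofList (counter.map (fun p => p.2)))) :
    ((PySem.List.sorted counter key).foldl groupStepA
        ((PySem.Dict.empty : PySem.Dict Int (List String × Int)), 0, 0, none)).1.items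
      = buildB K (fun c => (counter.filter (fun p => p.2 == c)).map (fun p => p.1)) 0 := by
  set G : Int → List String :=
    fun c => (counter.filter (fun p => p.2 == c)).map (fun p => p.1) with hG
  have hblocks : ∀ c ∈ K, counter.filter (fun p => p.2 == c)
      = (G c).map (fun u => (u, c)) := fun c _ => by
    rw [hG]; exact block_eq_map counter c
  rw [hKs, flatMap_congr_mem K _ (fun c => (G c).map (fun u => (u, c))) hblocks]
  have hnd : K.Nodup := hKperm.symm.nodup (PySem.Set.nodup_ofList _)
  have hGne : ∀ c ∈ K, G c ≠ [] := by
    intro c hc h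
    have hcm : c ∈ counter.map (fun p : String × Int => p.2) :=
      (PySem.Set.mem_ofList _ _).1 (hKperm.mem_iff.1 hc)
    rcases List.mem_map.1 hcm with ⟨p, hp, hpc⟩
    have hpf : p ∈ counter.filter (fun p => p.2 == c) :=
      List.mem_filter.2 ⟨hp, by simp [hpc]⟩
    have : counter.filter (fun p => p.2 == c) = [] := List.map_eq_nil_iff.1 h
    rw [this] at hpf
    simp at hpf
  rw [runA_keys K G PySem.Dict.empty 0 0 none hnd hGne
    (fun c _ h => by cases h) (fun r hr => by simp [PySem.Dict.empty] at hr)]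
  simp [PySem.Dict.empty]

-- ===== VERDICT (by name: the statement is the Claim_ definition above) =====
theorem group_counter_py_spec : Claim_equal_group_counter_py := by
  intro counter reverse _
  unfold Spec_group_counter_py group_counter_py group_counter_py_alt
  simp only []
  set m := counter.map (fun p : String × Int => p.2) with hm
  have hkeys := keys_groups counter
  have hgetD : ∀ c : Int,
      ((counter.foldl (fun d p => d.modify p.2 [] (fun l => l ++ [p.1]))
          (PySem.Dict.empty : PySem.Dict Int (List String))).getD c [])
        = (counter.filter (fun p => p.2 == c)).map (fun p => p.1) := by
    intro c
    rw [getD_groups]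
    simp [PySem.Dict.empty, PySem.Dict.getD, PySem.Dict.get?]
  cases reverse
  · -- reverse = false: A sorts by -count ascending, B walks counts descending
    simp only [Bool.false_eq_true, if_false, Bool.not_false]
    set Kb := PySem.List.sorted (PySem.Set.ofList m) (fun c : Int => c) true with hKb
    have hmapneg : counter.map (fun v : String × Int => -v.2) = m.map (fun c => -c) := by
      rw [hm, List.map_map]; rfl
    have hsorted : PySem.List.sorted counter (fun v => -v.2)
        = Kb.flatMap (fun c => counter.filter (fun p => p.2 == c)) := by
      rw [stable_sort_flatMap (fun v : String × Int => -v.2) counter, hmapneg,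
        ofList_map_neg, sorted_map_neg, ← hKb, flatMap_map]
      apply flatMap_congr_mem
      intro c _
      apply List.filter_congr
      intro p _
      rcases eq_or_ne p.2 c with h | h
      · simp [h]
      · have h2 : -p.2 ≠ -c := by omega
        simp [h, h2]
    rw [main_equiv counter _ Kb hsorted
      ((PySem.List.sorted_perm _ _ _).trans (List.Perm.refl _)), hkeys, foldB_run]
    have : (fun c : Int =>
        ((counter.foldl (fun d p => d.modify p.2 [] (fun l => l ++ [p.1]))
          (PySem.Dict.empty : PySem.Dict Int (List String))).getD c []))
        = fun c => (counter.filter (fun p => p.2 == c)).map (fun p => p.1) :=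
      funext hgetD
    rw [this, ← hm, ← hKb, List.nil_append]
  · -- reverse = true: A sorts by count ascending, B walks counts ascending
    simp only [if_true, Bool.not_true]
    set Ka := PySem.List.sorted (PySem.Set.ofList m) (fun c : Int => c) false with hKa
    have hsorted : PySem.List.sorted counter (fun v => v.2)
        = Ka.flatMap (fun c => counter.filter (fun p => p.2 == c)) := by
      rw [stable_sort_flatMap (fun v : String × Int => v.2) counter, ← hm, ← hKa]
    rw [main_equiv counter _ Ka hsorted
      ((PySem.List.sorted_perm _ _ _).trans (List.Perm.refl _)), hkeys, foldB_run]
    have : (fun c : Int =>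
        ((counter.foldl (fun d p => d.modify p.2 [] (fun l => l ++ [p.1]))
          (PySem.Dict.empty : PySem.Dict Int (List String))).getD c []))
        = fun c => (counter.filter (fun p => p.2 == c)).map (fun p => p.1) :=
      funext hgetD
    rw [this, ← hm, ← hKa, List.nil_append]
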